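-- pv_equiv track=rewrite | github.com/Vangaren1/Leetcode-Practice | Daily/Delete_Columns_To_Make_Sorted/delete__columns__to__make__sorted.py | minDeletionSize
-- ===== SOURCE A (Python) =====
-- from typing import Optional, List
--
-- def minDeletionSize(strs: List[str]) -> int:
--     def lex(s):
--         last = -1
--         for ch in s:
--             if ord(ch) < last:
--                 return False
--             last = ord(ch)
--         return True
--
--     total = 0
--
--     for col in range(len(strs[0])):
--         s = "".join([c[col] for c in strs])
--         if not lex(s):
--             total += 1
--
--     return total
-- ===== SOURCE B (Python) =====
-- from typing import List
--
-- def minDeletionSize(strs: List[str]) -> int: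
--     cols = len(strs[0])
--     bad = set()
--     for i in range(len(strs) - 1):
--         for col in range(cols):
--             if strs[i][col] > strs[i + 1][col]:
--                 bad.add(col)
--     return len(bad)
-- ===== Notes on version B (the rewrite author's own statement) =====
-- stated objective: alternative
-- what changed: Row-major single scan over adjacent row pairs collecting offending column indices in a set, instead of A's column-major pass that materialises each column as a joined string and checks it with an ord-accumulator helper.
import Mathlib
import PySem

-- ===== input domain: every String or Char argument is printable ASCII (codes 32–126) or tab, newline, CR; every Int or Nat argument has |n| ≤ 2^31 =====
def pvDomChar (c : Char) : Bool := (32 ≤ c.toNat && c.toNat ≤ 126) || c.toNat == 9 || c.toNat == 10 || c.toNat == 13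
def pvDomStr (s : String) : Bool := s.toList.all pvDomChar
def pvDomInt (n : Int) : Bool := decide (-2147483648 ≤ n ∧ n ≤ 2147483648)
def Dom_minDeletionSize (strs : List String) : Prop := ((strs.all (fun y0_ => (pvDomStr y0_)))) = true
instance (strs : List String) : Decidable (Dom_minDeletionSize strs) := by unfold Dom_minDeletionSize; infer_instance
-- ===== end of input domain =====

-- B replaces A's column-major join-and-check pass by a row-major scan over adjacent row pairs
-- collecting offending column indices in a set (alternative decomposition, same cost).


-- ===== PORT A =====
-- helper `lex(s)`: scan with `last`, return False on a descent (exact transliteration)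
def pvLex (last : Int) : List Char → Bool
  | [] => true
  | ch :: rest => if (ch.toNat : Int) < last then false else pvLex (ch.toNat : Int) rest

-- c[col]: Python raises where pyGet? is none; Pre_ keeps every index in range, so the default is never read there
def pvCharAt (c : String) (col : Int) : Char := (PySem.Str.pyGet? c col).getD ' '

def minDeletionSize (strs : List String) : Int :=
  (PySem.List.pyRange 0 (PySem.Str.len ((PySem.List.pyGet? strs 0).getD "")) 1).foldl
    (fun total col =>
      let s : List Char := strs.map (fun c => pvCharAt c col)   -- "".join([c[col] for c in strs])
      if pvLex (-1) s then total else total + 1) 0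

-- ===== PORT B =====
def minDeletionSize_alt (strs : List String) : Int :=
  let cols : Int := PySem.Str.len ((PySem.List.pyGet? strs 0).getD "")
  let bad : PySem.Set Int :=
    (PySem.List.pyRange 0 ((strs.length : Int) - 1) 1).foldl (fun bad i =>
      (PySem.List.pyRange 0 cols 1).foldl (fun bad col =>
        if pvCharAt ((PySem.List.pyGet? strs (i + 1)).getD "") col
             < pvCharAt ((PySem.List.pyGet? strs i).getD "") col
        then PySem.Set.add bad col else bad) bad) PySem.Set.empty
  PySem.Set.len bad

-- ===== PRECONDITION & SPEC =====
-- Pre_ excludes exactly the inputs where the Python A raises IndexError: the empty list (strs[0]),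
-- and lists in which some string is shorter than strs[0] (c[col] out of range).
def Pre_minDeletionSize (strs : List String) : Prop :=
  strs ≠ [] ∧ ∀ s ∈ strs, (strs.headD "").length ≤ s.length
instance (strs : List String) : Decidable (Pre_minDeletionSize strs) := by
  unfold Pre_minDeletionSize; infer_instance

def pvWitness_minDeletionSize : List String := ["cba", "daf", "ghi"]

def Spec_minDeletionSize (strs : List String) (out : Int) : Prop := out = minDeletionSize_alt strs
instance (strs : List String) (out : Int) : Decidable (Spec_minDeletionSize strs out) := by
  unfold Spec_minDeletionSize; infer_instance

-- ===== CLAIM (what is proved, stated in full; the proofs are below) =====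
def Claim_equal_minDeletionSize : Prop := ∀ (strs : List String), Dom_minDeletionSize strs → Pre_minDeletionSize strs → Spec_minDeletionSize strs (minDeletionSize strs)

-- ===== LEMMAS AND PROOFS =====

-- a column is "bad" iff some adjacent row pair descends at it
def pvBad (strs : List String) (col : Int) : Prop :=
  ∃ k : Nat, k + 1 < strs.length ∧
    pvCharAt (strs.getD (k + 1) "") col < pvCharAt (strs.getD k "") col

theorem pvCharLe (a b : Char) : a ≤ b ↔ a.toNat ≤ b.toNat := by
  rw [Char.le_def, UInt32.le_iff_toNat_le]; rfl

theorem pvLex_cons (a : Char) (l : List Char) :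
    pvLex ((a.toNat : Int)) l = true ↔ List.IsChain (· ≤ ·) (a :: l) := by
  induction l generalizing a with
  | nil => simp [pvLex]
  | cons b r ih =>
    simp only [pvLex]
    by_cases hb : ((b.toNat : Int)) < ((a.toNat : Int))
    · rw [if_pos hb, List.isChain_cons_cons]
      simp only [Bool.false_eq_true, false_iff]
      rintro ⟨hab, -⟩
      exact absurd (Int.ofNat_le.mpr ((pvCharLe a b).mp hab)) (by omega)
    · rw [if_neg hb, ih, List.isChain_cons_cons]
      exact ⟨fun h => ⟨(pvCharLe a b).mpr (Int.ofNat_le.mp (by omega)), h⟩, fun h => h.2⟩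

theorem pvLex_neg_one (l : List Char) :
    pvLex (-1) l = true ↔ List.IsChain (· ≤ ·) l := by
  cases l with
  | nil => simp [pvLex]
  | cons c r =>
    simp only [pvLex]
    rw [if_neg (by have := Int.natCast_nonneg c.toNat; omega)]
    exact pvLex_cons c r

-- A's per-column check, characterised by pvBad
theorem pvLex_col (strs : List String) (col : Int) :
    pvLex (-1) (strs.map (fun c => pvCharAt c col)) = true ↔ ¬ pvBad strs col := by
  rw [pvLex_neg_one, List.isChain_iff_getElem]
  unfold pvBad
  simp only [List.length_map, List.getElem_map]
  constructor
  · rintro h ⟨k, hk, hlt⟩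
    have := h k (by omega)
    rw [List.getD_eq_getElem _ _ (by omega), List.getD_eq_getElem _ _ (by omega)] at hlt
    exact absurd hlt (not_lt.mpr this)
  · intro h k hk
    by_contra hle
    exact h ⟨k, by omega, by
      rw [List.getD_eq_getElem _ _ (by omega), List.getD_eq_getElem _ _ (by omega)]
      exact lt_of_not_ge hle⟩

theorem pvNotLex (strs : List String) (col : Int) :
    (!pvLex (-1) (strs.map (fun c => pvCharAt c col))) = true ↔ pvBad strs col := by
  cases hl : pvLex (-1) (strs.map (fun c => pvCharAt c col)) with
  | false =>
    simp only [Bool.not_false, true_iff]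
    by_contra hb
    rw [(pvLex_col strs col).mpr hb] at hl
    exact Bool.true_eq_false.mp hl
  | true =>
    simp only [Bool.not_true, Bool.false_eq_true, false_iff]
    exact (pvLex_col strs col).mp hl

theorem mem_foldl_add {β : Type} (g : PySem.Set Int → β → PySem.Set Int) (Q : β → Int → Prop)
    (hg : ∀ s b x, x ∈ g s b ↔ x ∈ s ∨ Q b x) :
    ∀ (l : List β) (s : PySem.Set Int) (x : Int),
      x ∈ l.foldl g s ↔ x ∈ s ∨ ∃ b ∈ l, Q b x := by
  intro l
  induction l with
  | nil => simp
  | cons b l ih =>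
    intro s x
    rw [List.foldl_cons, ih, hg]
    simp only [List.mem_cons]
    aesop

theorem nodup_foldl_add {β : Type} (g : PySem.Set Int → β → PySem.Set Int)
    (hg : ∀ s b, List.Nodup s → List.Nodup (g s b)) :
    ∀ (l : List β) (s : PySem.Set Int), List.Nodup s → List.Nodup (l.foldl g s) := by
  intro l
  induction l with
  | nil => exact fun s hs => hs
  | cons b l ih => exact fun s hs => ih _ (hg _ _ hs)

theorem pvGetD_str (strs : List String) (k : Nat) :
    (PySem.List.pyGet? strs ((k : Int))).getD "" = strs.getD k "" := by
  simp [List.getD_eq_getElem?_getD]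

-- membership in B's `bad` set
theorem mem_bad_iff (strs : List String) (cols : Int) (x : Int) :
    x ∈ (PySem.List.pyRange 0 ((strs.length : Int) - 1) 1).foldl (fun bad i =>
          (PySem.List.pyRange 0 cols 1).foldl (fun bad col =>
            if pvCharAt ((PySem.List.pyGet? strs (i + 1)).getD "") col
                 < pvCharAt ((PySem.List.pyGet? strs i).getD "") col
            then PySem.Set.add bad col else bad) bad) PySem.Set.empty
      ↔ x ∈ PySem.List.pyRange 0 cols 1 ∧ pvBad strs x := by
  rw [mem_foldl_add _
    (fun i x => ∃ col ∈ PySem.List.pyRange 0 cols 1,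
      (pvCharAt ((PySem.List.pyGet? strs (i + 1)).getD "") col
        < pvCharAt ((PySem.List.pyGet? strs i).getD "") col) ∧ x = col)
    (fun s i x => by
      rw [mem_foldl_add _
        (fun col x => (pvCharAt ((PySem.List.pyGet? strs (i + 1)).getD "") col
            < pvCharAt ((PySem.List.pyGet? strs i).getD "") col) ∧ x = col)
        (fun s col x => by
          by_cases h : pvCharAt ((PySem.List.pyGet? strs (i + 1)).getD "") col
              < pvCharAt ((PySem.List.pyGet? strs i).getD "") col
          · rw [if_pos h, PySem.Set.mem_add]; tauto
          · rw [if_neg h]; tauto)]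
      )]
  constructor
  · rintro (h | ⟨i, hi, col, hcol, hlt, rfl⟩)
    · exact absurd h (List.not_mem_nil)
    · refine ⟨hcol, ?_⟩
      rw [PySem.List.mem_pyRange_one] at hi
      obtain ⟨k, rfl⟩ := Int.eq_ofNat_of_zero_le hi.1
      refine ⟨k, by omega, ?_⟩
      rw [← pvGetD_str strs k, ← pvGetD_str strs (k + 1)]
      push_cast
      exact hlt
  · rintro ⟨hx, k, hk, hlt⟩
    right
    refine ⟨(k : Int), by rw [PySem.List.mem_pyRange_one]; omega, x, hx, ?_, rfl⟩
    rw [show ((k : Int) + 1) = ((k + 1 : Nat) : Int) by push_cast; ring,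
      pvGetD_str strs k, pvGetD_str strs (k + 1)]
    exact hlt

theorem nodup_bad (strs : List String) (cols : Int) :
    List.Nodup ((PySem.List.pyRange 0 ((strs.length : Int) - 1) 1).foldl (fun bad i =>
      (PySem.List.pyRange 0 cols 1).foldl (fun bad col =>
        if pvCharAt ((PySem.List.pyGet? strs (i + 1)).getD "") col
             < pvCharAt ((PySem.List.pyGet? strs i).getD "") col
        then PySem.Set.add bad col else bad) bad) PySem.Set.empty) := by
  refine nodup_foldl_add _ (fun s i hs => ?_) _ _ List.nodup_nil
  refine nodup_foldl_add _ (fun s col hs => ?_) _ _ hs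
  split
  · exact PySem.Set.nodup_add _ _ hs
  · exact hs

-- ===== VERDICT (by name: the statement is the Claim_ definition above) =====
theorem minDeletionSize_spec : Claim_equal_minDeletionSize := by
  intro strs _ _
  show minDeletionSize strs = minDeletionSize_alt strs
  unfold minDeletionSize minDeletionSize_alt
  have hbody : (fun (total : Int) col =>
        let s : List Char := strs.map (fun c => pvCharAt c col)
        if pvLex (-1) s then total else total + 1)
      = fun (total : Int) col =>
        if (!pvLex (-1) (strs.map (fun c => pvCharAt c col))) = true
        then total + 1 else total := by
    funext t c
    cases h : pvLex (-1) (strs.map (fun c' => pvCharAt c' c)) <;> simp [h]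
  rw [hbody, PySem.List.foldl_count_if, List.countP_eq_length_filter]
  show (0 : Int) + _ = PySem.Set.len _
  rw [PySem.Set.len, zero_add]
  congr 1
  refine (List.Perm.length_eq ?_).symm
  rw [List.perm_ext_iff_of_nodup
    (nodup_bad strs (PySem.Str.len ((PySem.List.pyGet? strs 0).getD "")))
    ((PySem.List.nodup_pyRange_one 0 _).filter _)]
  intro x
  rw [mem_bad_iff, List.mem_filter, pvNotLex]
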